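-- pv_equiv track=rewrite | github.com/mathelai/github.io | imo2017p5/simulation.py | sir_alex_algorithm
-- ===== SOURCE A (Python) =====
-- from typing import List, Tuple, Optional, Dict, Set
--
-- def sir_alex_algorithm(heights: List[int], n: int) -> Optional[List[int]]:
--     """
--     Sir Alex's algorithm: The constructive proof approach.
--
--     Algorithm (greedy approach):
--     1. For each iteration i from 1 to n:
--        - Find the two tallest players among those still remaining
--        - Remove all players strictly between their positions
--        - Mark these two as "processed" (they form a pair)
--     2. After n iterations, exactly 2n players should remain
--
--     This ensures that for pair i (ranks 2i-1 and 2i), no one stands between them.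
--     """
--     num_players = len(heights)
--
--     # Track which players are still active
--     active = list(range(num_players))
--
--     # Process n pairs
--     for round_num in range(n):
--         if len(active) < 2:
--             return None
--
--         # Find indices in active list of the two tallest players
--         active_heights = [(heights[i], i, idx) for idx, i in enumerate(active)]
--         active_heights.sort(reverse=True)
--
--         # Get the two tallest
--         _, pos1, idx1 = active_heights[0]
--         _, pos2, idx2 = active_heights[1]
--
--         # Find leftmost and rightmost positions
--         left_pos = min(pos1, pos2)
--         right_pos = max(pos1, pos2)
--
--         # Remove all players strictly between left_pos and right_pos
--         new_active = []
--         for p in active: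
--             # Keep if not strictly between
--             if not (left_pos < p < right_pos):
--                 new_active.append(p)
--
--         active = new_active
--
--     # Should have exactly 2n players remaining
--     if len(active) != 2 * n:
--         return None
--
--     return sorted(active)
-- ===== SOURCE B (Python) =====
-- from typing import List, Optional
--
-- def sir_alex_algorithm(heights: List[int], n: int) -> Optional[List[int]]:
--     # The two selected tallest players are never removed and nothing is ever
--     # added, so the removal round is idempotent: perform it exactly once.
--     num_players = len(heights)
--     if n <= 0:
--         return [] if num_players == 2 * n else None
--     if num_players < 2:
--         return None
--     # tallest by (height, index): last index attaining the max height
--     best = 0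
--     for i in range(1, num_players):
--         if heights[i] >= heights[best]:
--             best = i
--     # second tallest by (height, index) among the rest
--     second = 1 if best == 0 else 0
--     for i in range(num_players):
--         if i != best and heights[i] >= heights[second]:
--             second = i
--     lo, hi = (best, second) if best < second else (second, best)
--     active = [p for p in range(num_players) if p <= lo or p >= hi]
--     return active if len(active) == 2 * n else None
-- ===== Notes on version B (the rewrite author's own statement) =====
-- stated objective: faster
-- what changed: B replaces A's n-round simulation (each round re-sorting the active list) by a single pass: since the two tallest players are never removed, the round is idempotent, so B finds the two tallest with two linear scans (no sort), removes the players strictly between them once, and applies the final length check.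
import Mathlib
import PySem

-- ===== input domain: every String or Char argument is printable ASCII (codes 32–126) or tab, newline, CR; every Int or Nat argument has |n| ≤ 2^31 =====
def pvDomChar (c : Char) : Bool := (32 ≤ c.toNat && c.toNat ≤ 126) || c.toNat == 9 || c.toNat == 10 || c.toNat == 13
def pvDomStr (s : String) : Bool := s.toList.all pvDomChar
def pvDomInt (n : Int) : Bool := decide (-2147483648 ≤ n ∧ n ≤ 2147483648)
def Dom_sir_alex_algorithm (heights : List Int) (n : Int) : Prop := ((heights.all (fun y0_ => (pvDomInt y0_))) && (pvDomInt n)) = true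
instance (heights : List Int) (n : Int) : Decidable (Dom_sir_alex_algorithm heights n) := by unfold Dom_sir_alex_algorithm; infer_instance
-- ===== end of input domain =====

-- B performs A's removal round exactly once (the round is idempotent: the two selected
-- tallest players are never removed), finding the two tallest by linear scans, no sort.

-- ===== PORT A =====
-- one iteration of A's loop body: find the two tallest among `active`, drop all
-- indices strictly between them; `none` models the early `return None`.
def pvAStep (heights : List Int) (active : List Int) : Option (List Int) :=
  if active.length < 2 then none
  else
    -- Python sorts triples (heights[i], i, idx) descending; idx is the enumerate index,
    -- determined by i (and the i in `active` are distinct), so the third tuple component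
    -- never decides a comparison: sorting by the first two components is exact.
    let active_heights := (PySem.List.enumerate active).map
      (fun p => (PySem.List.pyGetD heights p.2 0, p.2, p.1))
    let s := PySem.List.sorted2 active_heights (fun t => t.1) (fun t => t.2.1) true
    let t1 := PySem.List.pyGetD s 0 (0, 0, 0)
    let t2 := PySem.List.pyGetD s 1 (0, 0, 0)
    let left_pos := min t1.2.1 t2.2.1
    let right_pos := max t1.2.1 t2.2.1
    some (active.foldl
      (fun acc p => if ¬ (left_pos < p ∧ p < right_pos) then acc ++ [p] else acc) [])

def sir_alex_algorithm (heights : List Int) (n : Int) : Option (List Int) :=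
  let num_players : Int := heights.length
  let active0 := PySem.List.pyRange 0 num_players 1
  -- the early `return None` inside the loop is modelled by a none-absorbing state
  let res := (PySem.List.pyRange 0 n 1).foldl
    (fun st _ => match st with
      | none => none
      | some active => pvAStep heights active) (some active0)
  match res with
  | none => none
  | some active =>
    if (active.length : Int) ≠ 2 * n then none
    else some (PySem.List.sorted active (fun x => x) false)

-- ===== PORT B =====
def sir_alex_algorithm_alt (heights : List Int) (n : Int) : Option (List Int) :=
  let num_players : Int := heights.length
  if n ≤ 0 then (if num_players = 2 * n then some [] else none)
  else if num_players < 2 then none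
  else
    let best := (PySem.List.pyRange 1 num_players 1).foldl
      (fun b i => if PySem.List.pyGetD heights b 0 ≤ PySem.List.pyGetD heights i 0 then i else b) 0
    let second0 : Int := if best = 0 then 1 else 0
    let second := (PySem.List.pyRange 0 num_players 1).foldl
      (fun b i => if i ≠ best then
          (if PySem.List.pyGetD heights b 0 ≤ PySem.List.pyGetD heights i 0 then i else b)
        else b) second0
    let lo := if best < second then best else second
    let hi := if best < second then second else best
    let active := (PySem.List.pyRange 0 num_players 1).filter (fun p => decide (p ≤ lo ∨ hi ≤ p))
    if (active.length : Int) = 2 * n then some active else none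

-- ===== PRECONDITION & SPEC =====
def Spec_sir_alex_algorithm (heights : List Int) (n : Int) (out : Option (List Int)) : Prop := out = sir_alex_algorithm_alt heights n
instance (heights : List Int) (n : Int) (out : Option (List Int)) : Decidable (Spec_sir_alex_algorithm heights n out) := by unfold Spec_sir_alex_algorithm; infer_instance

-- ===== CLAIM (what is proved, stated in full; the proofs are below) =====
def Claim_equal_sir_alex_algorithm : Prop := ∀ (heights : List Int) (n : Int), Dom_sir_alex_algorithm heights n → Spec_sir_alex_algorithm heights n (sir_alex_algorithm heights n)

-- ===== LEMMAS AND PROOFS =====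

-- the (height, index) comparison key, with Python's lexicographic tuple order
def pvKey (heights : List Int) (i : Int) : Lex (Int × Int) :=
  toLex (PySem.List.pyGetD heights i 0, i)

lemma pvKey_le_iff (h : List Int) (a b : Int) :
    pvKey h a ≤ pvKey h b ↔
      (PySem.List.pyGetD h a 0 < PySem.List.pyGetD h b 0 ∨
        (PySem.List.pyGetD h a 0 = PySem.List.pyGetD h b 0 ∧ a ≤ b)) := by
  simp [pvKey, Prod.Lex.le_iff]

lemma pvKey_inj (h : List Int) {a b : Int} (he : pvKey h a = pvKey h b) : a = b := by
  have := congrArg (fun k => (ofLex k).2) he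
  simpa [pvKey] using this

-- Python's tuple sort with a two-component key is the sort by the lexicographic key
lemma pvSorted2_lex {α : Type} (xs : List α) (k1 k2 : α → Int) (rev : Bool) :
    PySem.List.sorted2 xs k1 k2 rev =
      PySem.List.sorted xs (fun x => (toLex (k1 x, k2 x) : Lex (Int × Int))) rev := by
  unfold PySem.List.sorted2 PySem.List.sorted
  have h : (fun a b => decide (k1 a < k1 b) || (!decide (k1 b < k1 a) && decide (k2 a < k2 b)))
      = fun a b => decide ((toLex (k1 a, k2 a) : Lex (Int × Int)) < toLex (k1 b, k2 b)) := by
    funext a b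
    by_cases h1 : k1 a < k1 b <;> by_cases h2 : k1 b < k1 a <;> by_cases h3 : k2 a < k2 b <;>
      simp [h1, h2, h3, Prod.Lex.lt_iff] <;> omega
  rw [h]

lemma pvRange_nil {n : Int} (h : n ≤ 0) : PySem.List.pyRange 0 n 1 = [] := by
  simp [PySem.List.pyRange]; omega

lemma pvRange_len (m : Nat) : (PySem.List.pyRange 0 (m : Int) 1).length = m := by
  rw [PySem.List.pyRange_zero_natCast]
  simp

lemma pvRange_pairwise (a b : Int) : (PySem.List.pyRange a b 1).Pairwise (· < ·) := by
  rw [PySem.List.pyRange_of_pos a b (by norm_num)]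
  refine List.Pairwise.map _ (fun x y hxy => ?_) List.pairwise_lt_range
  omega

-- the ≥-last-wins linear scan over an increasing candidate list computes the (height, index)-max
lemma pvArgmaxFold (heights : List Int) :
    ∀ (l : List Int) (b0 : Int), l.Pairwise (· < ·) → (∀ i ∈ l, b0 ≤ i) →
      ((l.foldl (fun b i => if PySem.List.pyGetD heights b 0 ≤ PySem.List.pyGetD heights i 0 then i else b) b0) = b0 ∨
        (l.foldl (fun b i => if PySem.List.pyGetD heights b 0 ≤ PySem.List.pyGetD heights i 0 then i else b) b0) ∈ l) ∧
      pvKey heights b0 ≤ pvKey heights (l.foldl (fun b i => if PySem.List.pyGetD heights b 0 ≤ PySem.List.pyGetD heights i 0 then i else b) b0) ∧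
      ∀ i ∈ l, pvKey heights i ≤ pvKey heights (l.foldl (fun b i => if PySem.List.pyGetD heights b 0 ≤ PySem.List.pyGetD heights i 0 then i else b) b0) := by
  intro l
  induction l with
  | nil => intro b0 _ _; simp [pvKey_le_iff]
  | cons x t ih =>
    intro b0 hpw hge
    have hxt : ∀ j ∈ t, x < j := fun j hj => (List.pairwise_cons.1 hpw).1 j hj
    have hpt : t.Pairwise (· < ·) := (List.pairwise_cons.1 hpw).2
    have hbx : b0 ≤ x := hge x List.mem_cons_self
    simp only [List.foldl_cons]
    by_cases hc : PySem.List.pyGetD heights b0 0 ≤ PySem.List.pyGetD heights x 0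
    · rw [if_pos hc]
      obtain ⟨hmem, hle, hdom⟩ := ih x hpt (fun j hj => le_of_lt (hxt j hj))
      refine ⟨?_, ?_, ?_⟩
      · rcases hmem with h | h
        · exact Or.inr (by rw [h]; exact List.mem_cons_self)
        · exact Or.inr (List.mem_cons_of_mem _ h)
      · calc pvKey heights b0 ≤ pvKey heights x := by rw [pvKey_le_iff]; omega
          _ ≤ _ := hle
      · intro i hi
        rcases List.mem_cons.1 hi with rfl | hi
        · exact hle
        · exact hdom i hi
    · rw [if_neg hc]
      obtain ⟨hmem, hle, hdom⟩ := ih b0 hpt (fun j hj => le_of_lt (lt_of_le_of_lt hbx (hxt j hj)))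
      refine ⟨?_, hle, ?_⟩
      · rcases hmem with h | h
        · exact Or.inl h
        · exact Or.inr (List.mem_cons_of_mem _ h)
      · intro i hi
        rcases List.mem_cons.1 hi with rfl | hi
        · calc pvKey heights i ≤ pvKey heights b0 := by rw [pvKey_le_iff]; omega
            _ ≤ _ := hle
        · exact hdom i hi

-- what one round does: it keeps exactly what is not strictly between the two (height, index)-maxima
lemma pvAStep_spec (heights active : List Int) (hnd : active.Nodup) (hlen : 2 ≤ active.length) :
    ∃ p1 p2, p1 ∈ active ∧ p2 ∈ active ∧ p1 ≠ p2 ∧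
      (∀ y ∈ active, pvKey heights y ≤ pvKey heights p1) ∧
      (∀ y ∈ active, y ≠ p1 → pvKey heights y ≤ pvKey heights p2) ∧
      pvAStep heights active =
        some (active.filter (fun p => decide (¬ (min p1 p2 < p ∧ p < max p1 p2)))) := by
  set triples := (PySem.List.enumerate active).map
      (fun p => (PySem.List.pyGetD heights p.2 0, p.2, p.1)) with htr
  have hproj : triples.map (fun t => t.2.1) = active := by
    rw [htr, List.map_map]
    exact PySem.List.map_snd_enumerate active 0
  have hmemproj : ∀ t ∈ triples, t.2.1 ∈ active := by
    intro t ht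
    rw [← hproj]; exact List.mem_map_of_mem ht
  have hkey : ∀ t ∈ triples, (toLex (t.1, t.2.1) : Lex (Int × Int)) = pvKey heights t.2.1 := by
    intro t ht
    obtain ⟨p, _, rfl⟩ := List.mem_map.1 ht
    rfl
  have hexists : ∀ y ∈ active, ∃ t ∈ triples, t.2.1 = y := by
    intro y hy
    rw [← hproj] at hy
    obtain ⟨t, ht, h⟩ := List.mem_map.1 hy
    exact ⟨t, ht, h⟩
  have hs2 := pvSorted2_lex triples (fun t => t.1) (fun t => t.2.1) true
  have hlens : (PySem.List.sorted triples (fun t => (toLex (t.1, t.2.1) : Lex (Int × Int))) true).length = active.length := by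
    rw [PySem.List.length_sorted, htr, List.length_map, PySem.List.length_enumerate]
  rcases hL : PySem.List.sorted triples (fun t => (toLex (t.1, t.2.1) : Lex (Int × Int))) true with _ | ⟨m1, rest1⟩
  · rw [hL] at hlens; simp at hlens; omega
  rcases rest1 with _ | ⟨m2, rest⟩
  · rw [hL] at hlens; simp at hlens; omega
  have hperm : (m1 :: m2 :: rest).Perm triples := hL ▸ PySem.List.sorted_perm triples _ true
  have hm1 : m1 ∈ triples := hperm.subset (by simp)
  have hm2 : m2 ∈ triples := hperm.subset (by simp)
  have hndp : ((m1 :: m2 :: rest).map (fun t => t.2.1)).Nodup := by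
    refine ((hperm.map _).nodup_iff).2 (hproj ▸ hnd)
  have hne : m1.2.1 ≠ m2.2.1 := by
    intro h
    simp [h] at hndp
  have hdom1 : ∀ y ∈ active, pvKey heights y ≤ pvKey heights m1.2.1 := by
    intro y hy
    obtain ⟨t, ht, rfl⟩ := hexists y hy
    have := PySem.List.key_head_sorted_rev_ge triples (fun t => (toLex (t.1, t.2.1) : Lex (Int × Int))) hL t ht
    rw [← hkey t ht, ← hkey m1 hm1]
    exact this
  have hpw := hL ▸ PySem.List.sorted_pairwise_rev triples (fun t => (toLex (t.1, t.2.1) : Lex (Int × Int)))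
  have hdom2 : ∀ y ∈ active, y ≠ m1.2.1 → pvKey heights y ≤ pvKey heights m2.2.1 := by
    intro y hy hyne
    obtain ⟨t, ht, rfl⟩ := hexists y hy
    have htl : t ∈ m2 :: rest := by
      have : t ∈ m1 :: m2 :: rest := hperm.mem_iff.2 ht
      rcases List.mem_cons.1 this with rfl | h
      · exact absurd rfl hyne
      · exact h
    have hkle : (toLex (t.1, t.2.1) : Lex (Int × Int)) ≤ toLex (m2.1, m2.2.1) := by
      rcases List.mem_cons.1 htl with rfl | h
      · exact le_refl _
      · exact (List.pairwise_cons.1 (List.pairwise_cons.1 hpw).2).1 t h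
    rw [← hkey t ht, ← hkey m2 hm2]
    exact hkle
  refine ⟨m1.2.1, m2.2.1, hmemproj m1 hm1, hmemproj m2 hm2, hne, hdom1, hdom2, ?_⟩
  unfold pvAStep
  rw [if_neg (by omega)]
  simp only [← htr, hs2, hL]
  rw [show PySem.List.pyGetD (m1 :: m2 :: rest) 0 (0,0,0) = m1 by
        simp [PySem.List.pyGetD_zero_cons],
      show PySem.List.pyGetD (m1 :: m2 :: rest) 1 (0,0,0) = m2 by
        rw [show (1:Int) = ((1:Nat):Int) from rfl, PySem.List.pyGetD_natCast]; rfl]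
  rw [PySem.List.foldl_append_ite_eq_filter]
  simp

lemma pvFoldStable {β : Type} (g : List Int → Option (List Int)) (a : List Int)
    (h : g a = some a) (l : List β) :
    l.foldl (fun st _ => match st with | none => none | some x => g x) (some a) = some a := by
  induction l with
  | nil => rfl
  | cons x t ih => simpa [h] using ih

lemma pvFoldNone {β : Type} (g : List Int → Option (List Int)) (l : List β) :
    l.foldl (fun st _ => match st with | none => none | some x => g x) none = none := by
  induction l with
  | nil => rfl
  | cons x t ih => simpa using ih

lemma pvTwoLe {l : List Int} {x y : Int} (hx : x ∈ l) (hy : y ∈ l) (hne : x ≠ y) :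
    2 ≤ l.length := by
  cases l with
  | nil => simp at hx
  | cons a t =>
    cases t with
    | nil => simp_all
    | cons b u => simp [List.length]

-- the main case: at least one round, at least two players
lemma pvMain (heights : List Int) (n : Int) (hn : 0 < n) (hm : 2 ≤ (heights.length : Int)) :
    sir_alex_algorithm heights n = sir_alex_algorithm_alt heights n := by
  unfold sir_alex_algorithm sir_alex_algorithm_alt
  simp only []
  rw [if_neg (by omega : ¬ n ≤ 0), if_neg (by omega : ¬ (heights.length : Int) < 2)]
  set A0 := PySem.List.pyRange 0 (heights.length : Int) 1 with hA0
  have hlenA0 : A0.length = heights.length := pvRange_len heights.length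
  have hpwA0 : A0.Pairwise (· < ·) := pvRange_pairwise 0 (heights.length : Int)
  have hndA0 : A0.Nodup := hpwA0.imp (fun h => ne_of_lt h)
  have hmemA0 : ∀ x : Int, x ∈ A0 ↔ 0 ≤ x ∧ x < (heights.length : Int) := by
    intro x; rw [hA0]; exact PySem.List.mem_pyRange_one
  obtain ⟨p1, p2, hp1, hp2, hne, hdom1, hdom2, hstep⟩ :=
    pvAStep_spec heights A0 hndA0 (by omega)
  -- characterize B's `best`
  obtain ⟨hbm, hb0le, hbdom⟩ := pvArgmaxFold heights (PySem.List.pyRange 1 (heights.length : Int) 1) 0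
    (pvRange_pairwise 1 (heights.length : Int))
    (fun i hi => by rw [PySem.List.mem_pyRange_one] at hi; omega)
  set best := (PySem.List.pyRange 1 (heights.length : Int) 1).foldl
      (fun b i => if PySem.List.pyGetD heights b 0 ≤ PySem.List.pyGetD heights i 0 then i else b) 0 with hbest
  have hbestmem : best ∈ A0 := by
    rcases hbm with h | h
    · rw [h, hmemA0]; omega
    · rw [PySem.List.mem_pyRange_one] at h; rw [hmemA0]; omega
  have hbestdom : ∀ y ∈ A0, pvKey heights y ≤ pvKey heights best := by
    intro y hy
    rw [hmemA0] at hy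
    rcases eq_or_lt_of_le hy.1 with h | h
    · rw [← h]; exact hb0le
    · exact hbdom y (by rw [PySem.List.mem_pyRange_one]; omega)
  have hp1b : p1 = best :=
    pvKey_inj heights (le_antisymm (hbestdom p1 hp1) (hdom1 best hbestmem))
  -- characterize B's `second`
  rw [PySem.List.foldl_ite_eq_foldl_filter (fun i => i ≠ best)
    (fun b i => if PySem.List.pyGetD heights b 0 ≤ PySem.List.pyGetD heights i 0 then i else b)]
  set l2 := (PySem.List.pyRange 0 (heights.length : Int) 1).filter (fun i => decide (i ≠ best)) with hl2
  have hpw2 : l2.Pairwise (· < ·) := hpwA0.filter _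
  have hmem2 : ∀ x : Int, x ∈ l2 ↔ (x ∈ A0 ∧ x ≠ best) := by
    intro x
    rw [hl2, List.mem_filter]
    simp [hA0]
  obtain ⟨hsm, hs0le, hsdom⟩ := pvArgmaxFold heights l2 (if best = 0 then 1 else 0) hpw2
    (by
      intro i hi
      rw [hmem2] at hi
      have := (hmemA0 i).1 hi.1
      have hnb := hi.2
      split <;> omega)
  set second := l2.foldl
      (fun b i => if PySem.List.pyGetD heights b 0 ≤ PySem.List.pyGetD heights i 0 then i else b)
      (if best = 0 then 1 else 0) with hsecond
  have hs0mem : (if best = 0 then (1:Int) else 0) ∈ A0 ∧ (if best = 0 then (1:Int) else 0) ≠ best := by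
    constructor
    · rw [hmemA0]; split <;> omega
    · split
      · omega
      · omega
  have hsecmem : second ∈ A0 ∧ second ≠ best := by
    rcases hsm with h | h
    · rw [h]; exact hs0mem
    · rw [hmem2] at h; exact h
  have hsecdom : ∀ y ∈ A0, y ≠ best → pvKey heights y ≤ pvKey heights second := by
    intro y hy hyb
    exact hsdom y ((hmem2 y).2 ⟨hy, hyb⟩)
  have hp2s : p2 = second := by
    refine pvKey_inj heights (le_antisymm ?_ ?_)
    · exact hsecdom p2 hp2 (by rw [← hp1b]; exact fun h => hne h.symm)
    · exact hdom2 second hsecmem.1 (by rw [hp1b]; exact hsecmem.2)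
  -- the two filtered survivor lists coincide
  have hact : A0.filter (fun p => decide (¬ (min p1 p2 < p ∧ p < max p1 p2)))
      = A0.filter (fun p => decide (p ≤ (if best < second then best else second) ∨
          (if best < second then second else best) ≤ p)) := by
    refine List.filter_congr ?_
    intro x _
    rw [decide_eq_decide, ← hp1b, ← hp2s]
    split <;> omega
  set a1 := A0.filter (fun p => decide (¬ (min p1 p2 < p ∧ p < max p1 p2))) with ha1
  -- A's loop: the first round produces a1, every later round is a no-op on a1
  have hsub : ∀ x ∈ a1, x ∈ A0 := fun x hx => (List.mem_filter.1 hx).1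
  have hpred : ∀ x ∈ a1, decide (¬ (min p1 p2 < x ∧ x < max p1 p2)) = true :=
    fun x hx => (List.mem_filter.1 hx).2
  have hnd1 : a1.Nodup := hndA0.filter _
  have hp1a : p1 ∈ a1 := List.mem_filter.2 ⟨hp1, by simp; omega⟩
  have hp2a : p2 ∈ a1 := List.mem_filter.2 ⟨hp2, by simp; omega⟩
  have hidem : pvAStep heights a1 = some a1 := by
    obtain ⟨q1, q2, hq1, hq2, hqne, hqd1, hqd2, hstep2⟩ :=
      pvAStep_spec heights a1 hnd1 (pvTwoLe hp1a hp2a hne)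
    have hq1p1 : q1 = p1 :=
      pvKey_inj heights (le_antisymm (hdom1 q1 (hsub q1 hq1)) (hqd1 p1 hp1a))
    have hq2p2 : q2 = p2 := by
      refine pvKey_inj heights (le_antisymm ?_ ?_)
      · exact hdom2 q2 (hsub q2 hq2) (by rw [← hq1p1]; exact fun h => hqne h.symm)
      · exact hqd2 p2 hp2a (by rw [hq1p1]; exact fun h => hne h.symm)
    rw [hstep2, hq1p1, hq2p2]
    congr 1
    exact List.filter_eq_self.2 hpred
  have hA : (PySem.List.pyRange 0 n 1).foldl
      (fun st _ => match st with
        | none => none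
        | some active => pvAStep heights active) (some A0) = some a1 := by
    rw [PySem.List.pyRange_one_cons hn, List.foldl_cons]
    have h01 : (0:Int) + 1 = 1 := by norm_num
    rw [h01]
    show (PySem.List.pyRange 1 n 1).foldl _ (pvAStep heights A0) = some a1
    rw [hstep]
    exact pvFoldStable (pvAStep heights) a1 hidem _
  rw [hA]
  show (if ((a1.length : Int) ≠ 2 * n) then none
      else some (PySem.List.sorted a1 (fun x => x) false)) = _
  have hsorted : PySem.List.sorted a1 (fun x => x) false = a1 :=
    PySem.List.sorted_eq_self_of_pairwise a1 _ ((hpwA0.filter _).imp (fun h => le_of_lt h))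
  rw [hsorted, ← hact]
  by_cases hfin : (a1.length : Int) = 2 * n
  · rw [if_neg (by omega), if_pos hfin]
  · rw [if_pos hfin, if_neg hfin]

-- ===== VERDICT (by name: the statement is the Claim_ definition above) =====
theorem sir_alex_algorithm_spec : Claim_equal_sir_alex_algorithm := by
  intro heights n _
  unfold Spec_sir_alex_algorithm
  by_cases hn : n ≤ 0
  · unfold sir_alex_algorithm sir_alex_algorithm_alt
    simp only []
    rw [if_pos hn, pvRange_nil hn, List.foldl_nil]
    show (if ((PySem.List.pyRange 0 (heights.length : Int) 1).length : Int) ≠ 2 * n then none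
        else some (PySem.List.sorted (PySem.List.pyRange 0 (heights.length : Int) 1) (fun x => x) false))
      = (if (heights.length : Int) = 2 * n then some [] else none)
    rw [pvRange_len heights.length]
    by_cases he : (heights.length : Int) = 2 * n
    · have h0 : heights.length = 0 := by omega
      rw [if_neg (by omega), if_pos he, h0]
      rfl
    · rw [if_pos he, if_neg he]
  · by_cases hm : (heights.length : Int) < 2
    · have hstep0 : pvAStep heights (PySem.List.pyRange 0 (heights.length : Int) 1) = none := by
        unfold pvAStep
        rw [if_pos (by rw [pvRange_len]; omega)]
      unfold sir_alex_algorithm sir_alex_algorithm_alt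
      simp only []
      rw [if_neg hn, if_pos hm, PySem.List.pyRange_one_cons (by omega : (0:Int) < n),
        List.foldl_cons]
      simp only [hstep0, pvFoldNone]
    · exact pvMain heights n (by omega) (by omega)
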